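-- pv_equiv track=rewrite | github.com/posl/comment_recommendation | script/split_gen/5_time/zh/113_D/8.py | amidakuji
-- ===== SOURCE A (Python) =====
-- def amidakuji(h, w, k):
--     #h:垂直线的数量
--     #w:水平线的数量
--     #k:起始垂直线的位置
--     #返回满足条件的羊皮卷的数量
--     if h == 1:
--         if k == 1:
--             return 1
--         elif k == w:
--             return 1
--         else:
--             return 0
--     elif k == 1:
--         return amidakuji(h-1, w, k+1)
--     elif k == w:
--         return amidakuji(h-1, w, k-1)
--     else:
--         return amidakuji(h-1, w, k-1) + amidakuji(h-1, w, k+1)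
-- ===== SOURCE B (Python) =====
-- def amidakuji(h, w, k):
--     # Level-by-level DP: cur maps each reachable vertical-line position to the
--     # number of ways to be there; one pass per level instead of branching recursion.
--     cur = {k: 1}
--     for _ in range(h - 1):
--         nxt = {}
--         for p, c in cur.items():
--             if p == 1:
--                 nxt[p + 1] = nxt.get(p + 1, 0) + c
--             elif p == w:
--                 nxt[p - 1] = nxt.get(p - 1, 0) + c
--             else:
--                 nxt[p - 1] = nxt.get(p - 1, 0) + c
--                 nxt[p + 1] = nxt.get(p + 1, 0) + c
--         cur = nxt
--     return sum(c for p, c in cur.items() if p == 1 or p == w)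
-- ===== Notes on version B (the rewrite author's own statement) =====
-- stated objective: faster
-- what changed: Replaces A's exponential branching recursion over the height with an iterative level-by-level dynamic program that carries a dictionary mapping each reachable position to its path count; intended as faster (asymptotic): in a timing run A timed out already at n=16 where B returned, so no ratio could be measured.
import Mathlib
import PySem

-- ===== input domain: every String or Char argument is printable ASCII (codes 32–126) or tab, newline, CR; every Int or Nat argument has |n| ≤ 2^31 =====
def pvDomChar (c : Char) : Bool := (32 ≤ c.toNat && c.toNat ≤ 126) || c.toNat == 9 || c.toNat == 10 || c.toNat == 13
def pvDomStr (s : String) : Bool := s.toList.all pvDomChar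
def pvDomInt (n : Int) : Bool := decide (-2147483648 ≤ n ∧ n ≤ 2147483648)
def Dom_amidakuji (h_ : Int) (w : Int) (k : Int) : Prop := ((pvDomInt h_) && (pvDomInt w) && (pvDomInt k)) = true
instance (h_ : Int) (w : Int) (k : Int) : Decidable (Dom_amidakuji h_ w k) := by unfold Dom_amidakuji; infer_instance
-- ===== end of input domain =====

-- B replaces A's branching double recursion over h by a level-by-level DP over a
-- dictionary of reachable positions (objective: faster — intended asymptotic; a timing run
-- saw A time out at n=16 where B returned, so no ratio was measured).

-- ===== PORT A =====
-- A recurses on h, decreasing by 1 down to the h == 1 base case; the recursion depth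
-- h - 1 is carried as the Nat index n (n = h - 1), which for h ≥ 1 (Pre_) is exactly
-- A's recursion; for h ≤ 0 Python recurses forever (RecursionError) — excluded by Pre_.
def amidakujiRec (w : Int) : Nat → Int → Int
  | 0, k => if k = 1 then 1 else if k = w then 1 else 0
  | n + 1, k =>
    if k = 1 then amidakujiRec w n (k + 1)
    else if k = w then amidakujiRec w n (k - 1)
    else amidakujiRec w n (k - 1) + amidakujiRec w n (k + 1)

def amidakuji (h_ : Int) (w : Int) (k : Int) : Int := amidakujiRec w (h_ - 1).toNat k

-- ===== PORT B =====
-- one DP level: distribute every (position, count) entry of cur into the next dict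
def stepDict (w : Int) (cur : PySem.Dict Int Int) : PySem.Dict Int Int :=
  cur.items.foldl (fun nxt pc =>
    if pc.1 = 1 then nxt.modify (pc.1 + 1) 0 (· + pc.2)
    else if pc.1 = w then nxt.modify (pc.1 - 1) 0 (· + pc.2)
    else (nxt.modify (pc.1 - 1) 0 (· + pc.2)).modify (pc.1 + 1) 0 (· + pc.2))
    PySem.Dict.empty

def amidakuji_alt (h_ : Int) (w : Int) (k : Int) : Int :=
  let init : PySem.Dict Int Int := PySem.Dict.empty.insert k 1
  let cur := (List.range (h_ - 1).toNat).foldl (fun d _ => stepDict w d) init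
  cur.items.foldl (fun s pc => if pc.1 = 1 ∨ pc.1 = w then s + pc.2 else s) 0

-- ===== PRECONDITION & SPEC =====
-- Pre_ excludes h ≤ 0, on which A's recursion never reaches its base case and Python
-- raises RecursionError.
def Pre_amidakuji (h_ : Int) (w : Int) (k : Int) : Prop := 1 ≤ h_
instance (h_ : Int) (w : Int) (k : Int) : Decidable (Pre_amidakuji h_ w k) := by unfold Pre_amidakuji; infer_instance
def pvWitness_amidakuji : Int × Int × Int := (3, 3, 1)

def Spec_amidakuji (h_ : Int) (w : Int) (k : Int) (out : Int) : Prop := out = amidakuji_alt h_ w k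
instance (h_ : Int) (w : Int) (k : Int) (out : Int) : Decidable (Spec_amidakuji h_ w k out) := by unfold Spec_amidakuji; infer_instance

-- ===== CLAIM (what is proved, stated in full; the proofs are below) =====
def Claim_equal_amidakuji : Prop := ∀ (h_ : Int) (w : Int) (k : Int), Dom_amidakuji h_ w k → Pre_amidakuji h_ w k → Spec_amidakuji h_ w k (amidakuji h_ w k)

-- ===== LEMMAS AND PROOFS =====

-- weighted sum of a dict's items under a position-valuation f
def wsum (f : Int → Int) (l : List (Int × Int)) : Int :=
  (l.map (fun pc => pc.2 * f pc.1)).sum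

-- inserting getD + c at key x into a dict with distinct keys adds c * f x to wsum
theorem wsum_insert_add (f : Int → Int) (l : List (Int × Int)) (x c : Int)
    (h : (l.map Prod.fst).Nodup) :
    wsum f ((PySem.Dict.mk l).insert x ((PySem.Dict.mk l).getD x 0 + c)).items
      = wsum f l + c * f x := by
  induction l with
  | nil =>
    simp [PySem.Dict.insert, PySem.Dict.contains, PySem.Dict.getD, PySem.Dict.get?, wsum]
  | cons hd t ih =>
    obtain ⟨p, a⟩ := hd
    simp only [List.map_cons, List.nodup_cons] at h
    obtain ⟨hpm, ht⟩ := h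
    by_cases hpx : p = x
    · subst hpx
      have hc : (PySem.Dict.mk ((p, a) :: t)).contains p = true := by
        simp [PySem.Dict.contains]
      have hg : (PySem.Dict.mk ((p, a) :: t)).getD p 0 = a := by
        simp [PySem.Dict.getD_eq_get?_getD, PySem.Dict.get?_mk_cons]
      rw [PySem.Dict.items_insert_of_contains _ _ hc, hg]
      have hmap : ∀ q ∈ t, (fun q : Int × Int => if (q.1 == p) = true then (p, a + c) else q) q = q := by
        intro q hq
        have : q.1 ≠ p := fun e => hpm (e ▸ List.mem_map_of_mem hq)
        simp [this]
      simp only [List.map_cons, beq_self_eq_true, List.map_congr_left hmap]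
      simp [wsum]
      ring
    · have hg : (PySem.Dict.mk ((p, a) :: t)).getD x 0 = (PySem.Dict.mk t).getD x 0 := by
        have : (p == x) = false := by simp [hpx]
        simp [PySem.Dict.getD_eq_get?_getD, PySem.Dict.get?_mk_cons, this]
      have hitems : ((PySem.Dict.mk ((p, a) :: t)).insert x ((PySem.Dict.mk t).getD x 0 + c)).items
          = (p, a) :: ((PySem.Dict.mk t).insert x ((PySem.Dict.mk t).getD x 0 + c)).items := by
        have hpb : (p == x) = false := by simp [hpx]
        by_cases hct : (PySem.Dict.mk t).contains x = true
        · have hcc : (PySem.Dict.mk ((p, a) :: t)).contains x = true := by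
            simp only [PySem.Dict.contains, List.any_cons] at hct ⊢
            simp [hct]
          rw [PySem.Dict.items_insert_of_contains _ _ hcc,
              PySem.Dict.items_insert_of_contains _ _ hct]
          simp only [List.map_cons, hpb, Bool.false_eq_true, if_false]
        · have hct' : (PySem.Dict.mk t).contains x = false := by
            rw [Bool.not_eq_true] at hct; exact hct
          have hcc : (PySem.Dict.mk ((p, a) :: t)).contains x = false := by
            simp only [PySem.Dict.contains, List.any_cons] at hct' ⊢
            simp [hct', hpb]
          rw [PySem.Dict.items_insert_of_not_contains _ _ hcc,
              PySem.Dict.items_insert_of_not_contains _ _ hct']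
          simp
      rw [hg, hitems]
      have := ih ht
      simp only [wsum, List.map_cons, List.sum_cons] at this ⊢
      rw [this]
      ring

theorem wsum_modify_add (f : Int → Int) (d : PySem.Dict Int Int) (x c : Int)
    (h : d.keys.Nodup) :
    wsum f (d.modify x 0 (· + c)).items = wsum f d.items + c * f x := by
  obtain ⟨l⟩ := d
  exact wsum_insert_add f l x c (by simpa [PySem.Dict.keys] using h)

theorem nodup_modify (d : PySem.Dict Int Int) (x c : Int) (h : d.keys.Nodup) :
    (d.modify x 0 (· + c)).keys.Nodup := PySem.Dict.nodup_keys_insert _ _ _ h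

-- folding one DP level turns the valuation at depth n + 1 into the valuation at depth n
theorem fold_step (w : Int) (n : Nat) (l : List (Int × Int)) (nxt : PySem.Dict Int Int)
    (h : nxt.keys.Nodup) :
    wsum (amidakujiRec w n) ((l.foldl (fun nxt pc =>
      if pc.1 = 1 then nxt.modify (pc.1 + 1) 0 (· + pc.2)
      else if pc.1 = w then nxt.modify (pc.1 - 1) 0 (· + pc.2)
      else (nxt.modify (pc.1 - 1) 0 (· + pc.2)).modify (pc.1 + 1) 0 (· + pc.2)) nxt)).items
      = wsum (amidakujiRec w n) nxt.items + wsum (amidakujiRec w (n + 1)) l := by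
  induction l generalizing nxt with
  | nil => simp [wsum]
  | cons pc t ih =>
    obtain ⟨p, c⟩ := pc
    simp only [List.foldl_cons]
    by_cases h1 : p = 1
    · rw [if_pos h1, ih _ (nodup_modify _ _ _ h), wsum_modify_add _ _ _ _ h]
      subst h1
      simp only [wsum, List.map_cons, List.sum_cons, amidakujiRec]
      norm_num
      ring
    · by_cases h2 : p = w
      · rw [if_neg h1, if_pos h2, ih _ (nodup_modify _ _ _ h), wsum_modify_add _ _ _ _ h]
        simp only [wsum, List.map_cons, List.sum_cons]
        have : amidakujiRec w (n + 1) p = amidakujiRec w n (p - 1) := by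
          simp only [amidakujiRec, if_neg h1, if_pos h2]
        rw [this]; ring
      · rw [if_neg h1, if_neg h2, ih _ (nodup_modify _ _ _ (nodup_modify _ _ _ h)),
            wsum_modify_add _ _ _ _ (nodup_modify _ _ _ h), wsum_modify_add _ _ _ _ h]
        simp only [wsum, List.map_cons, List.sum_cons]
        have : amidakujiRec w (n + 1) p = amidakujiRec w n (p - 1) + amidakujiRec w n (p + 1) := by
          simp only [amidakujiRec, if_neg h1, if_neg h2]
        rw [this]; ring

theorem wsum_stepDict (w : Int) (n : Nat) (d : PySem.Dict Int Int) :
    wsum (amidakujiRec w n) (stepDict w d).items = wsum (amidakujiRec w (n + 1)) d.items := by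
  unfold stepDict
  rw [fold_step w n d.items PySem.Dict.empty (PySem.Dict.nodup_keys_empty)]
  simp [wsum, PySem.Dict.empty]

theorem items_init (k : Int) : (PySem.Dict.empty.insert k 1 : PySem.Dict Int Int).items = [(k, 1)] := by
  rw [PySem.Dict.items_insert_of_not_contains _ _ (PySem.Dict.contains_empty k)]
  simp [PySem.Dict.empty]

-- the final summation of B computes wsum at depth 0
theorem final_sum (w : Int) (l : List (Int × Int)) (s : Int) :
    l.foldl (fun s pc => if pc.1 = 1 ∨ pc.1 = w then s + pc.2 else s) s
      = s + wsum (amidakujiRec w 0) l := by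
  induction l generalizing s with
  | nil => simp [wsum]
  | cons pc t ih =>
    simp only [List.foldl_cons, ih, wsum, List.map_cons, List.sum_cons, amidakujiRec]
    by_cases h1 : pc.1 = 1
    · simp [h1]; ring
    · by_cases h2 : pc.1 = w
      · simp [h2]; ring
      · simp [h1, h2]

theorem iter_invariant (w k : Int) (n j : Nat) (hj : j ≤ n) :
    wsum (amidakujiRec w (n - j))
      ((List.range j).foldl (fun d _ => stepDict w d) (PySem.Dict.empty.insert k 1)).items
      = amidakujiRec w n k := by
  induction j with
  | zero =>
    simp only [List.range_zero, List.foldl_nil, Nat.sub_zero, items_init]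
    simp [wsum]
  | succ j ih =>
    rw [List.range_succ, List.foldl_append, List.foldl_cons, List.foldl_nil, wsum_stepDict]
    have : n - (j + 1) + 1 = n - j := by omega
    rw [this]
    exact ih (by omega)

-- ===== VERDICT (by name: the statement is the Claim_ definition above) =====
theorem amidakuji_spec : Claim_equal_amidakuji := by
  intro h_ w k _ _
  unfold Spec_amidakuji amidakuji amidakuji_alt
  rw [final_sum]
  have h := iter_invariant w k (h_ - 1).toNat (h_ - 1).toNat (le_refl _)
  rw [Nat.sub_self] at h
  rw [h, zero_add]
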